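-- pv_equiv track=rewrite | github.com/amandamurphy2025/projects | CMSC_14100/homework_4.py | total_badness
-- ===== SOURCE A (Python) =====
-- def total_badness(text, width):
--     """
--     Computes the total badness of a string of given text when it is split into
--     lines of a given width. Badness is the sum of the cubes of the trailing
--     spaces of each line.
--
--     Inputs:
--         text (str): string of any length and characters
--         width (int): maximum length of each line
--
--     Output: badness of the given text having been split into lines (int)
--     """
--
--     split_txt = text.split()
--
--     list_of_lines = []
--
--     adding_list = ""
--
--     for idx, n in enumerate(split_txt):
--         if len(n) + len(adding_list) <= width:
--             adding_list = adding_list + n + " "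
--         elif len(adding_list) != 0:
--             adding_list = adding_list[:-1]
--             list_of_lines.append(adding_list)
--             adding_list = n + " "
--         elif len(adding_list) == 0:
--             adding_list = n + " "
--     adding_list = adding_list[:-1]
--     list_of_lines.append(adding_list)
--
--     for idx, n in enumerate(list_of_lines):
--         dif = width - len(n)
--         if dif > 0:
--             list_of_lines[idx] = n + ("_" * dif)
--         if dif < 0:
--             list_of_lines[idx] = n + ("_" * abs(dif))
--
--     list_of_blanks = []
--
--     for idx, n in enumerate(list_of_lines):
--         blanks = n.count("_")
--         list_of_blanks.append(blanks)
--
--     list_of_blanks.remove(list_of_blanks[-1])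
--
--     for idx, n in enumerate(list_of_blanks):
--         list_of_blanks[idx] = n * n * n
--
--     return sum(list_of_blanks)
-- ===== SOURCE B (Python) =====
-- def total_badness(text, width):
--     """Computes the total badness of text wrapped greedily into lines of the
--     given width.  A finished line is padded with one '_' per column it falls
--     short of (or exceeds) the width, and contributes the cube of its '_'
--     count; the line still open when the words run out costs nothing.
--
--     Streams over the words once, keeping only the line under construction
--     and the running total (no line list is built).
--     """
--     total = 0
--     cur = None
--     for word in text.split():
--         if cur is None:
--             cur = word
--         elif len(cur) + 1 + len(word) <= width:
--             cur += " " + word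
--         else:
--             total += (cur + "_" * abs(width - len(cur))).count("_") ** 3
--             cur = word
--     return total
-- ===== Notes on version B (the rewrite author's own statement) =====
-- stated objective: faster
-- what changed: A builds the wrapped lines as a list of strings, pads each with '_' in a second pass, collects '_' counts in a third, removes the last count and cubes-and-sums in two more; B streams over the words once, keeping only the line under construction and a running total, padding and scoring each line the moment it is finished, so no line list, blanks list or remove step exists.
import Mathlib
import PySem

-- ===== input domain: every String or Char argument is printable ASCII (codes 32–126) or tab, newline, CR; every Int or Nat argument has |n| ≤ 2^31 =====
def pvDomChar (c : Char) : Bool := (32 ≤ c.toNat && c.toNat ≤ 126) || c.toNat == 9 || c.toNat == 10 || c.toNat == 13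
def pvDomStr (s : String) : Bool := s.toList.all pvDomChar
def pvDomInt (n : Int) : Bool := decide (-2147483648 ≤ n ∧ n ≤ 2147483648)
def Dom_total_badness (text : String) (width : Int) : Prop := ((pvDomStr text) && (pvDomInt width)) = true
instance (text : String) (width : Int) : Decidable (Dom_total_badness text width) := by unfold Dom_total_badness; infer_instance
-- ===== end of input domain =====

-- B replaces A's five list-building passes (wrap into a line list, pad each with '_', collect the
-- '_' counts, drop the last, cube and sum) by one streaming pass that pads and scores each line the
-- moment it is finished, keeping only the open line and a running total; same return value.

-- ===== PORT A =====
-- Python "s * k" (string repetition; k ≤ 0 gives ""): exact.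
def strMul (s : String) (k : Int) : String :=
  String.ofList ((List.replicate k.toNat s.toList).flatten)

-- body of A's first loop (the index of `enumerate` is unused by A's loop body)
def tbStep (width : Int) (st : List String × String) (n : String) : List String × String :=
  if PySem.Str.len n + PySem.Str.len st.2 ≤ width then
    (st.1, st.2 ++ n ++ " ")
  else if PySem.Str.len st.2 ≠ 0 then
    (st.1 ++ [PySem.Str.slice st.2 none (some (-1))], n ++ " ")
  else
    (st.1, n ++ " ")

-- body of A's second loop: `list_of_lines[idx] = n + "_" * …` (both ifs read the old n)
def padLine (width : Int) (n : String) : String :=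
  let dif := width - PySem.Str.len n
  let n1 := if dif > 0 then n ++ strMul "_" dif else n
  if dif < 0 then n1 ++ strMul "_" |dif| else n1

def total_badness (text : String) (width : Int) : Int :=
  let split_txt := PySem.Str.split₀ text
  let st := split_txt.foldl (tbStep width) ([], "")
  let list_of_lines := st.1 ++ [PySem.Str.slice st.2 none (some (-1))]
  let padded := list_of_lines.map (padLine width)
  let blanks := padded.map (fun n => (PySem.Str.count n "_" : Int))
  -- list_of_blanks.remove(list_of_blanks[-1]); blanks is always nonempty and contains the value,
  -- so the `none` branches (Python IndexError/ValueError) are unreachable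
  match PySem.List.pyGet? blanks (-1) with
  | none => 0
  | some last =>
    match PySem.List.remove? blanks last with
    | none => 0
    | some blanks' => (blanks'.map (fun n => n * n * n)).sum

-- ===== PORT B =====
-- state: (running total, current open line as some cur / none)
def tbAltStep (width : Int) (st : Int × Option String) (word : String) : Int × Option String :=
  match st.2 with
  | none => (st.1, some word)
  | some cur =>
    if PySem.Str.len cur + 1 + PySem.Str.len word ≤ width then
      (st.1, some (cur ++ " " ++ word))
    else
      (st.1 + (PySem.Str.count (cur ++ strMul "_" |width - PySem.Str.len cur|) "_" : Int) ^ 3,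
       some word)

def total_badness_alt (text : String) (width : Int) : Int :=
  ((PySem.Str.split₀ text).foldl (tbAltStep width) (0, none)).1

-- ===== PRECONDITION & SPEC =====
def Spec_total_badness (text : String) (width : Int) (out : Int) : Prop := out = total_badness_alt text width
instance (text : String) (width : Int) (out : Int) : Decidable (Spec_total_badness text width out) := by unfold Spec_total_badness; infer_instance

-- ===== CLAIM (what is proved, stated in full; the proofs are below) =====
def Claim_equal_total_badness : Prop := ∀ (text : String) (width : Int), Dom_total_badness text width → Spec_total_badness text width (total_badness text width)

-- ===== LEMMAS AND PROOFS =====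

-- cost of a finalized line
def lineCost (width : Int) (l : String) : Int :=
  (|width - PySem.Str.len l| + (PySem.Str.count l "_" : Int)) ^ 3

-- counting a single-character pattern is counting that character
lemma count_go_single (c : Char) :
    ∀ (l : List Char) (fuel acc : Nat), l.length ≤ fuel →
      PySem.Chars.count.go [c] fuel l acc = acc + l.count c := by
  intro l
  induction l with
  | nil => intro fuel acc _; cases fuel <;> simp [PySem.Chars.count.go]
  | cons h t ih =>
    intro fuel acc hf
    cases fuel with
    | zero => simp at hf
    | succ f =>
      by_cases hc : c = h
      · subst hc
        have hpre : List.isPrefixOf [c] (c :: t) = true := by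
          simp [List.isPrefixOf]
        rw [show PySem.Chars.count.go [c] (f + 1) (c :: t) acc
              = if List.isPrefixOf [c] (c :: t) = true then
                  PySem.Chars.count.go [c] f (List.drop [c].length (c :: t)) (acc + 1)
                else PySem.Chars.count.go [c] f t acc from rfl]
        rw [if_pos hpre]
        rw [show List.drop [c].length (c :: t) = t by simp]
        rw [ih f (acc + 1) (by simpa using hf)]
        simp; omega
      · have hpre : List.isPrefixOf [c] (h :: t) = false := by
          simp [List.isPrefixOf, hc]
        rw [show PySem.Chars.count.go [c] (f + 1) (h :: t) acc
              = if List.isPrefixOf [c] (h :: t) = true then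
                  PySem.Chars.count.go [c] f (List.drop [c].length (h :: t)) (acc + 1)
                else PySem.Chars.count.go [c] f t acc from rfl]
        rw [if_neg (by simp [hpre])]
        rw [ih f acc (by simpa using hf)]
        simp [Ne.symm hc]

lemma cnt_eq_count (s : String) : PySem.Str.count s "_" = s.toList.count '_' := by
  rw [PySem.Str.count_eq]
  show PySem.Chars.count s.toList ['_'] = _
  rw [PySem.Chars.count]
  simp only [List.isEmpty_cons, if_neg Bool.false_ne_true]
  simpa using count_go_single '_' s.toList s.toList.length 0 le_rfl

lemma cnt_append (s t : String) :
    (PySem.Str.count (s ++ t) "_" : Int) = (PySem.Str.count s "_" : Int) + (PySem.Str.count t "_" : Int) := by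
  simp only [cnt_eq_count, String.toList_append, List.count_append]
  push_cast; ring

lemma cnt_strMul (k : Int) : (PySem.Str.count (strMul "_" k) "_" : Int) = max k 0 := by
  rw [cnt_eq_count, strMul, String.toList_ofList]
  have hfl : (List.replicate k.toNat "_".toList).flatten = List.replicate k.toNat '_' := by
    induction k.toNat with
    | zero => simp
    | succ n ih => simp only [List.replicate_succ, List.flatten_cons, ih]; rfl
  rw [hfl, List.count_replicate]
  simp

lemma len_nonneg (s : String) : 0 ≤ PySem.Str.len s := by
  rw [PySem.Str.len_eq]; positivity

-- B's padded-and-counted finalized line has exactly lineCost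
lemma pad_cost (width : Int) (cur : String) :
    (PySem.Str.count (cur ++ strMul "_" |width - PySem.Str.len cur|) "_" : Int) ^ 3
      = lineCost width cur := by
  rw [cnt_append, cnt_strMul, lineCost]
  have : max |width - PySem.Str.len cur| 0 = |width - PySem.Str.len cur| := by
    have := abs_nonneg (width - PySem.Str.len cur); omega
  rw [this]; ring

-- the stripped line `adding[:-1]` has body's length and count
lemma strip_len (body : String) :
    PySem.Str.len (PySem.Str.slice (body ++ " ") none (some (-1))) = PySem.Str.len body := by
  rw [PySem.Str.len_eq, PySem.Str.len_eq, PySem.Str.slice_to_neg_one]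
  simp

lemma strip_cnt (body : String) :
    PySem.Str.count (PySem.Str.slice (body ++ " ") none (some (-1))) "_" = PySem.Str.count body "_" := by
  rw [cnt_eq_count, cnt_eq_count, PySem.Str.slice_to_neg_one]
  simp

lemma strip_cost (width : Int) (body : String) :
    lineCost width (PySem.Str.slice (body ++ " ") none (some (-1))) = lineCost width body := by
  rw [lineCost, lineCost, strip_len, strip_cnt]

-- blanks of a padded line: the line's own underscores plus |width - len|
lemma blank_pad (width : Int) (l : String) :
    (PySem.Str.count (padLine width l) "_" : Int)
      = (PySem.Str.count l "_" : Int) + |width - PySem.Str.len l| := by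
  simp only [padLine]
  rcases lt_trichotomy (width - PySem.Str.len l) 0 with h | h | h
  · rw [if_pos h, if_neg (by omega), cnt_append, cnt_strMul]
    rw [abs_of_neg h]; omega
  · rw [if_neg (by omega), if_neg (by omega), h]; simp
  · rw [if_neg (by omega), if_pos h, cnt_append, cnt_strMul]
    rw [abs_of_pos h]; omega

-- removing the first occurrence of the last value keeps the multiset of the other entries
lemma sum_cube_remove (bs : List Int) (x : Int) :
    ∃ bs', PySem.List.remove? (bs ++ [x]) x = some bs' ∧
      (bs'.map (fun n => n * n * n)).sum = (bs.map (fun n => n * n * n)).sum := by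
  refine ⟨(bs ++ [x]).erase x, PySem.List.remove?_eq_some_erase (bs ++ [x]) x (by simp), ?_⟩
  have hperm : List.Perm ((bs ++ [x]).erase x) bs := by
    by_cases hx : x ∈ bs
    · rw [List.erase_append_left _ hx]
      exact (List.perm_append_singleton x _).trans (List.perm_cons_erase hx).symm
    · rw [List.erase_append_right _ hx]; simp
  exact List.Perm.sum_eq (hperm.map _)

-- A's four-pass pipeline applied to final lines ++ [last line] = cost sum of the non-final lines
lemma pipeline (width : Int) (lines : List String) (lastLine : String) :
    (match PySem.List.pyGet?
        (((lines ++ [lastLine]).map (padLine width)).map (fun n => (PySem.Str.count n "_" : Int))) (-1) with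
      | none => 0
      | some last =>
        match PySem.List.remove?
            (((lines ++ [lastLine]).map (padLine width)).map (fun n => (PySem.Str.count n "_" : Int))) last with
        | none => 0
        | some blanks' => (blanks'.map (fun n => n * n * n)).sum)
    = (lines.map (lineCost width)).sum := by
  have hmap : ((lines ++ [lastLine]).map (padLine width)).map (fun n => (PySem.Str.count n "_" : Int))
      = (lines.map (fun l => (PySem.Str.count (padLine width l) "_" : Int)))
        ++ [(PySem.Str.count (padLine width lastLine) "_" : Int)] := by
    simp [List.map_map]
  rw [hmap, PySem.List.pyGet?_neg_one_append_singleton]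
  obtain ⟨bs', h1, h2⟩ := sum_cube_remove
    (lines.map (fun l => (PySem.Str.count (padLine width l) "_" : Int)))
    ((PySem.Str.count (padLine width lastLine) "_" : Int))
  show (match PySem.List.remove?
      ((lines.map (fun l => (PySem.Str.count (padLine width l) "_" : Int)))
        ++ [(PySem.Str.count (padLine width lastLine) "_" : Int)])
      ((PySem.Str.count (padLine width lastLine) "_" : Int)) with
    | none => (0 : Int)
    | some blanks' => (blanks'.map (fun n => n * n * n)).sum) = _
  rw [h1]
  show (bs'.map (fun n => n * n * n)).sum = _
  rw [h2, List.map_map]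
  congr 1
  apply List.map_congr_left
  intro l _
  show (PySem.Str.count (padLine width l) "_" : Int) * (PySem.Str.count (padLine width l) "_" : Int)
      * (PySem.Str.count (padLine width l) "_" : Int) = lineCost width l
  rw [blank_pad, lineCost]
  ring

-- A's loop from a live line runs in lockstep with B's loop
lemma fold_sim (width : Int) (ws : List String) :
    ∀ (lines : List String) (body : String) (total : Int),
      total = (lines.map (lineCost width)).sum →
      ∃ lines' body',
        ws.foldl (tbStep width) (lines, body ++ " ") = (lines', body' ++ " ") ∧
        ws.foldl (tbAltStep width) (total, some body)
          = ((lines'.map (lineCost width)).sum, some body') := by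
  induction ws with
  | nil => intro lines body total ht; exact ⟨lines, body, rfl, by simp [ht]⟩
  | cons w ws ih =>
    intro lines body total ht
    simp only [List.foldl_cons]
    have hlb := len_nonneg body
    have hlsp : PySem.Str.len (" " : String) = 1 := by decide
    by_cases h : PySem.Str.len body + 1 + PySem.Str.len w ≤ width
    · -- the word fits on the current line
      have hA : tbStep width (lines, body ++ " ") w = (lines, (body ++ " " ++ w) ++ " ") := by
        rw [tbStep, if_pos (by simp only [PySem.Str.len_append, hlsp]; omega)]
      have hB : tbAltStep width (total, some body) w
          = (total, some (body ++ " " ++ w)) := by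
        rw [tbAltStep]
        simp only [if_pos h]
      rw [hA, hB]
      exact ih lines (body ++ " " ++ w) total ht
    · -- finalize the current line, start a new one with w
      have hA : tbStep width (lines, body ++ " ") w
          = (lines ++ [PySem.Str.slice (body ++ " ") none (some (-1))], w ++ " ") := by
        rw [tbStep, if_neg (by simp only [PySem.Str.len_append, hlsp]; have := len_nonneg w; omega),
          if_pos (by simp only [PySem.Str.len_append, hlsp]; omega)]
      have hB : tbAltStep width (total, some body) w
          = (total + lineCost width body, some w) := by
        rw [tbAltStep]; simp only [if_neg h, pad_cost]
      rw [hA, hB]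
      have hcost : total + lineCost width body
          = (((lines ++ [PySem.Str.slice (body ++ " ") none (some (-1))]).map (lineCost width)).sum) := by
        rw [List.map_append, List.sum_append, ← ht]
        simp [strip_cost]
      exact ih (lines ++ [PySem.Str.slice (body ++ " ") none (some (-1))]) w _ hcost

-- ===== VERDICT (by name: the statement is the Claim_ definition above) =====
theorem total_badness_spec : Claim_equal_total_badness := by
  intro text width _
  show total_badness text width = total_badness_alt text width
  rw [total_badness, total_badness_alt]
  cases hws : PySem.Str.split₀ text with
  | nil =>
    simp only [List.foldl_nil]
    exact pipeline width [] (PySem.Str.slice "" none (some (-1)))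
  | cons w rest =>
    simp only [List.foldl_cons]
    have h1 : tbStep width ([], "") w = ([], w ++ " ") := by
      rw [tbStep]
      by_cases h : PySem.Str.len w + PySem.Str.len ("" : String) ≤ width
      · rw [if_pos h]; simp
      · rw [if_neg h, if_neg (by decide)]
    have h2 : tbAltStep width (0, none) w = (0, some w) := rfl
    rw [h1, h2]
    obtain ⟨lines', body', hA, hB⟩ := fold_sim width rest [] w 0 (by simp)
    rw [hA, hB]
    exact pipeline width lines' (PySem.Str.slice (body' ++ " ") none (some (-1)))
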